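-- pv_equiv track=rewrite | github.com/jatinkrmalik/advent-of-code-2023 | day_11/cosmic_expansion_over_engineered.py | expand_space_map
-- ===== SOURCE A (Python) =====
-- EMPTY_SPACE = "."
--
-- GALAXY = "#"
--
-- def expand_space_map(space_map):
--     empty_rows, empty_cols = [], []
--
--     for i, row in enumerate(space_map):
--         if GALAXY not in row:
--             empty_rows.append(i)
--
--     for i, col in enumerate(space_map[0]):
--         if GALAXY not in [row[i] for row in space_map]:
--             empty_cols.append(i)
--
--     mod_count = 0
--     for i in empty_rows:
--         space_map.insert(i + mod_count, EMPTY_SPACE * len(space_map[i]))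
--         mod_count += 1
--
--     mod_count = 0
--     for i in empty_cols:
--         for j, row in enumerate(space_map):
--             space_map[j] = row[: i + mod_count] + EMPTY_SPACE + row[i + mod_count :]
--         mod_count += 1
--
--     return space_map
-- ===== SOURCE B (Python) =====
-- EMPTY_SPACE = "."
--
-- GALAXY = "#"
--
-- def expand_space_map(space_map):
--     # Single-pass rebuild: find the empty columns once (a set), then emit each row
--     # rebuilt in one pass with a "." inserted before every empty column, prepending
--     # one blank row per galaxy-free row.
--     # (A mutates space_map in place; B leaves it untouched -- return value only.)
--     n = len(space_map[0])
--     empty_cols = {j for j in range(n) if all(row[j] != GALAXY for row in space_map)}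
--     blank = EMPTY_SPACE * (n + len(empty_cols))
--     out = []
--     for row in space_map:
--         if GALAXY not in row:
--             out.append(blank)
--         out.append("".join(EMPTY_SPACE + c if j in empty_cols else c for j, c in enumerate(row)))
--     return out
-- ===== Notes on version B (the rewrite author's own statement) =====
-- stated objective: faster
-- what changed: A repeatedly splices whole rows into the list and re-slices every row once per empty column in place; B detects the empty columns once into a set, then rebuilds each row in a single pass inserting all column duplications together and prepending one precomputed blank row per galaxy-free row (B does not mutate its argument; the claim is about the return value).
-- outside the precondition, e.g. on expand_space_map(['#', '..', '.']): A returns ['#', '..', '..', '..', '.'], B returns ['#', '.', '..', '.', '.']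
import Mathlib
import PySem

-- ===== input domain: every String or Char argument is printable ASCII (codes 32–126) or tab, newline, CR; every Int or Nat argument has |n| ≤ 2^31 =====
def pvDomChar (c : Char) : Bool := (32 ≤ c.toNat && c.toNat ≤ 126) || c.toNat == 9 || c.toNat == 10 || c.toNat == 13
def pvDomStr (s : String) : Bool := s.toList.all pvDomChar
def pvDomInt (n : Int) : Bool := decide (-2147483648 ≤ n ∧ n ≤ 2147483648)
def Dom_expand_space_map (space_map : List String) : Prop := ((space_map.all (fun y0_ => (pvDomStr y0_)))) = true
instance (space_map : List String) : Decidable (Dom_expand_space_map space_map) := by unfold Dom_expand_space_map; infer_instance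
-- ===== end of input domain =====

-- Equivalence of two exact implementations of AoC 2023 day 11 map expansion: A splices rows/columns
-- in place (quadratic per column); B finds empty rows/columns once and rebuilds each row in one pass
-- (asymptotically faster). A mutates its argument in place, B does not: the claim is about the return value.


-- ===== PORT A =====
-- 'GALAXY not in row' is the one-char substring test PySem.Str.isIn "#" row; EMPTY_SPACE * k is
-- String.ofList (List.replicate k '.') (exact for the one-char string ".").
def expand_space_map (space_map : List String) : List String :=
  let empty_rows : List Int :=
    (PySem.List.enumerate space_map).foldl
      (fun acc p => if PySem.Str.isIn "#" p.2 then acc else acc ++ [p.1]) []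
  -- space_map[0]: IndexError on []; excluded by Pre_, so the .getD "" default is never reached there
  let row0 : String := (PySem.List.pyGet? space_map 0).getD ""
  let empty_cols : List Int :=
    (PySem.List.enumerate row0.toList).foldl
      (fun acc p =>
        -- '"#" not in [row[i] for row in space_map]': row[i] on a row shorter than row 0 is an
        -- IndexError (pyGet? = none), excluded by Pre_; the membership test is equality with "#",
        -- i.e. the char-level comparison with some '#'
        if (space_map.map (fun row => PySem.List.pyGet? row.toList p.1)).contains (some '#')
        then acc else acc ++ [p.1]) []
  let m1 : List String :=
    (empty_rows.foldl
      (fun (st : List String × Int) i =>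
        (PySem.List.insert st.1 (i + st.2)
          (String.ofList (List.replicate ((PySem.List.pyGet? st.1 i).getD "").toList.length '.')),
         st.2 + 1))
      (space_map, 0)).1
  let m2 : List String :=
    (empty_cols.foldl
      (fun (st : List String × Int) i =>
        -- 'for j, row in enumerate(space_map): space_map[j] = row[:k] + "." + row[k:]' updates each
        -- index exactly once from its old value: a map over the list
        (st.1.map (fun row =>
          String.ofList (PySem.List.slice row.toList none (some (i + st.2)) ++
            '.' :: PySem.List.slice row.toList (some (i + st.2)) none)),
         st.2 + 1))
      (m1, 0)).1
  m2

-- ===== PORT B =====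
def expand_space_map_alt (space_map : List String) : List String :=
  -- len(space_map[0]): IndexError on []; excluded by Pre_
  let n : Nat := ((PySem.List.pyGet? space_map 0).getD "").toList.length
  -- {j for j in range(n) if all(row[j] != GALAXY for row in space_map)}: a Python set of ints,
  -- used only for membership and len (order never consumed); row[j] on a row shorter than row 0
  -- is an IndexError, excluded by Pre_
  let empty_cols : PySem.Set Int := PySem.Set.ofList
    ((PySem.List.pyRange 0 (n : Int)).filter
      (fun j => space_map.all (fun row => ((PySem.List.pyGet? row.toList j).getD '#') != '#')))
  let blank : String := String.ofList (List.replicate (n + (PySem.Set.len empty_cols).toNat) '.')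
  space_map.foldl
    (fun out row =>
      let out1 := if PySem.Str.isIn "#" row then out else out ++ [blank]
      -- '"".join("." + c if j in empty_cols else c for j, c in enumerate(row))'
      out1 ++ [String.ofList ((PySem.List.enumerate row.toList).flatMap
        (fun p => if PySem.Set.contains empty_cols p.1 then ['.', p.2] else [p.2]))])
    []

-- ===== PRECONDITION & SPEC =====
-- Pre_ excludes the inputs on which A raises (the empty map, and any map whose first row is longer
-- than a later row: IndexError), and the ragged maps on which A's duplicated blank rows get their
-- lengths from in-place-shifted stale indices, a corner no one would specify: inside Pre_ every row
-- is at least as long as row 0, every row before the last galaxy-free row has row 0's length, and a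
-- galaxy-free row with no galaxy-free predecessor has row 0's length.
def Pre_expand_space_map (space_map : List String) : Prop :=
  space_map ≠ [] ∧
  (∀ r ∈ space_map, (space_map.headD "").toList.length ≤ r.toList.length) ∧
  (∀ j, ∀ (hj : j < space_map.length), PySem.Str.isIn "#" space_map[j] = false →
    ∀ i < j, ∀ (hi : i < space_map.length),
      space_map[i].toList.length = (space_map.headD "").toList.length) ∧
  (∀ j, ∀ (hj : j < space_map.length), PySem.Str.isIn "#" space_map[j] = false →
    (∀ i < j, ∀ (hi : i < space_map.length), PySem.Str.isIn "#" space_map[i] = true) →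
    space_map[j].toList.length = (space_map.headD "").toList.length)
instance (space_map : List String) : Decidable (Pre_expand_space_map space_map) := by unfold Pre_expand_space_map; infer_instance
def pvWitness_expand_space_map : List String := ["#.", "..", ".#"]
def Spec_expand_space_map (space_map : List String) (out : List String) : Prop := out = expand_space_map_alt space_map
instance (space_map : List String) (out : List String) : Decidable (Spec_expand_space_map space_map out) := by unfold Spec_expand_space_map; infer_instance

-- ===== CLAIM (what is proved, stated in full; the proofs are below) =====
def Claim_equal_expand_space_map : Prop := ∀ (space_map : List String), Dom_expand_space_map space_map → Pre_expand_space_map space_map → Spec_expand_space_map space_map (expand_space_map space_map)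

-- ===== LEMMAS AND PROOFS =====

-- proof-only helpers: the canonical description both ports are reduced to
def pvColEmpty (space_map : List String) (j : Int) : Bool :=
  !((space_map.map (fun row => PySem.List.pyGet? row.toList j)).contains (some '#'))

def pvExpandRow (e : Nat → Bool) : List Char → List Char
  | [] => []
  | c :: cs => (if e 0 then ['.', c] else [c]) ++ pvExpandRow (fun t => e (t + 1)) cs

def pvInsFold (l : List String) (v : String) (ks : List Int) (m : Int) : List String :=
  (ks.foldl (fun st i => (PySem.List.insert st.1 (i + st.2) v, st.2 + 1)) (l, m)).1

def pvRowTrans (cs : List Char) (ks : List Int) (m : Int) : List Char :=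
  (ks.foldl (fun (st : List Char × Int) i =>
    (PySem.List.slice st.1 none (some (i + st.2)) ++ '.' :: PySem.List.slice st.1 (some (i + st.2)) none,
     st.2 + 1)) (cs, m)).1

def pvE (sm : List String) (n : Nat) (r : String) : String :=
  String.ofList (pvExpandRow (fun j => decide (j < n) && pvColEmpty sm (j : Int)) r.toList)

def pvBlank (sm : List String) (n : Nat) : String :=
  String.ofList (List.replicate (n + (List.range n).countP (fun (j : Nat) => pvColEmpty sm (j : Int))) '.')

def pvCanon (sm : List String) (n : Nat) : List String :=
  sm.flatMap (fun r => if PySem.Str.isIn "#" r then [pvE sm n r] else [pvBlank sm n, pvE sm n r])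

-- Python list.insert at a nonnegative index is clamped take/drop
theorem pv_ins_nonneg {α : Type} (xs : List α) (i : Int) (h : 0 ≤ i) (v : α) :
    PySem.List.insert xs i v = xs.take i.toNat ++ v :: xs.drop i.toNat := by
  simp only [PySem.List.insert, PySem.List.sliceIndices]
  have h1 : ¬ ((1:Int) < 0) := by omega
  have h2 : ¬ (i < 0) := by omega
  simp only [if_neg h1, if_neg h2]
  rcases le_or_gt i (xs.length : Int) with hle | hgt
  · have : (min i (xs.length:Int)).toNat = i.toNat := by omega
    simp [this]
  · have : (min i (xs.length:Int)).toNat = xs.length := by omega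
    rw [this]
    simp [List.take_of_length_le (by omega : xs.length ≤ i.toNat),
          List.drop_of_length_le (by omega : xs.length ≤ i.toNat)]

theorem pv_insert_cons_succ {α : Type} (x : α) (l : List α) (j : Int) (h : 0 ≤ j) (v : α) :
    PySem.List.insert (x :: l) (j + 1) v = x :: PySem.List.insert l j v := by
  rw [pv_ins_nonneg _ _ (by omega), pv_ins_nonneg _ _ h]
  have : (j + 1).toNat = j.toNat + 1 := by omega
  simp [this]

-- enumerate from an arbitrary start is a shifted enumerate from 0
theorem pv_enum_shift {α : Type} (xs : List α) (s : Int) :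
    PySem.List.enumerate xs s = (PySem.List.enumerate xs 0).map (fun q => (q.1 + s, q.2)) := by
  induction xs generalizing s with
  | nil => simp [PySem.List.enumerate]
  | cons x xs ih =>
    rw [PySem.List.enumerate_cons, PySem.List.enumerate_cons, ih (s + 1), ih (0 + 1),
        List.map_cons, List.map_map]
    simp only [zero_add]
    congr 1
    apply List.map_congr_left
    intro q _
    simp [Function.comp]
    ring

-- branch-swapped foldl_append_if
theorem pv_foldl_append_ifnot {α β : Type} (p : α → Bool) (f : α → β) (l : List α) (acc : List β) :
    l.foldl (fun acc x => if p x then acc else acc ++ [f x]) acc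
      = acc ++ (l.filter (fun x => !p x)).map f := by
  have : (fun (acc : List β) x => if p x then acc else acc ++ [f x])
      = (fun acc x => if !p x then acc ++ [f x] else acc) := by
    funext acc x
    cases p x
    · simp
    · simp
  rw [this, PySem.List.foldl_append_if]

-- ==== the index list of the galaxy-free rows ====

theorem pv_ks_mem (p : String → Bool) (sm : List String) (k : Int)
    (hk : k ∈ ((PySem.List.enumerate sm).filter (fun q => !p q.2)).map (fun q => q.1)) :
    ∃ (a : Nat) (ha : a < sm.length), k = (a : Int) ∧ p sm[a] = false := by
  simp only [List.mem_map, List.mem_filter] at hk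
  obtain ⟨q, ⟨hq, hpq⟩, rfl⟩ := hk
  rw [PySem.List.mem_enumerate_iff] at hq
  obtain ⟨a, ha, rfl⟩ := hq
  exact ⟨a, ha, by simp, by simpa using hpq⟩

theorem pv_ks_complete (p : String → Bool) (sm : List String) (a : Nat) (ha : a < sm.length)
    (hp : p sm[a] = false) :
    (a : Int) ∈ ((PySem.List.enumerate sm).filter (fun q => !p q.2)).map (fun q => q.1) := by
  simp only [List.mem_map, List.mem_filter]
  refine ⟨((a : Int), sm[a]), ⟨?_, by simp [hp]⟩, rfl⟩
  rw [PySem.List.mem_enumerate_iff]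
  exact ⟨a, ha, by simp⟩

theorem pv_ks_sorted (p : String → Bool) (sm : List String) :
    (((PySem.List.enumerate sm).filter (fun q => !p q.2)).map (fun q => q.1)).Pairwise (· < ·) := by
  rw [List.pairwise_map]
  exact (PySem.List.pairwise_lt_enumerate sm 0).filter _

-- ==== phase 1 (rows): constant-blank insert fold ====

theorem pv_insFold_cons_succm (v : String) (ks : List Int) :
    ∀ (x : String) (l : List String) (m : Int), (∀ k ∈ ks, 0 ≤ k) → 0 ≤ m →
    pvInsFold (x :: l) v ks (m + 1) = x :: pvInsFold l v ks m := by
  induction ks with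
  | nil => intro x l m _ _; simp [pvInsFold]
  | cons k ks ih =>
    intro x l m hk hm
    have hk0 : 0 ≤ k := hk k (by simp)
    show pvInsFold (PySem.List.insert (x :: l) (k + (m+1)) v) v ks (m + 1 + 1)
          = x :: pvInsFold (PySem.List.insert l (k + m) v) v ks (m + 1)
    have : k + (m + 1) = (k + m) + 1 := by ring
    rw [this, pv_insert_cons_succ _ _ _ (by omega)]
    exact ih x _ (m + 1) (fun a ha => hk a (by simp [ha])) (by omega)

theorem pv_insFold_cons_shift (v : String) (ks : List Int) :
    ∀ (x : String) (l : List String) (m : Int), (∀ k ∈ ks, 0 ≤ k) → 0 ≤ m →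
    pvInsFold (x :: l) v (ks.map (· + 1)) m = x :: pvInsFold l v ks m := by
  induction ks with
  | nil => intro x l m _ _; simp [pvInsFold]
  | cons k ks ih =>
    intro x l m hk hm
    have hk0 : 0 ≤ k := hk k (by simp)
    show pvInsFold (PySem.List.insert (x :: l) ((k+1) + m) v) v (ks.map (· + 1)) (m + 1)
          = x :: pvInsFold (PySem.List.insert l (k + m) v) v ks (m + 1)
    have : (k + 1) + m = (k + m) + 1 := by ring
    rw [this, pv_insert_cons_succ _ _ _ (by omega)]
    exact ih x _ (m + 1) (fun a ha => hk a (by simp [ha])) (by omega)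

theorem pv_insFold_flatMap (p : String → Bool) (v : String) (l : List String) :
    pvInsFold l v (((PySem.List.enumerate l).filter (fun q => !p q.2)).map (fun q => q.1)) 0
      = l.flatMap (fun r => if p r then [r] else [v, r]) := by
  induction l with
  | nil => simp [pvInsFold, PySem.List.enumerate]
  | cons x xs ih =>
    rw [PySem.List.enumerate_cons]
    simp only [zero_add]
    rw [pv_enum_shift xs 1]
    have hnn : ∀ k ∈ ((PySem.List.enumerate xs).filter (fun q => !p q.2)).map (fun q => q.1), 0 ≤ k := by
      intro k hkmem
      obtain ⟨a, ha, rfl, _⟩ := pv_ks_mem p xs k hkmem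
      simp
    have hshift : ((((PySem.List.enumerate xs).map (fun q => (q.1 + 1, q.2))).filter
          (fun q => !p q.2)).map (fun q => q.1))
        = (((PySem.List.enumerate xs).filter (fun q => !p q.2)).map (fun q => q.1)).map (· + 1) := by
      rw [List.filter_map, List.map_map, List.map_map]
      rfl
    cases hx : p x with
    | true =>
      simp only [List.filter_cons, hx, Bool.not_true, Bool.false_eq_true, if_false]
      rw [hshift, pv_insFold_cons_shift _ _ _ _ _ hnn (by omega), ih]
      simp [hx]
    | false =>
      simp only [List.filter_cons, hx, Bool.not_false, if_true]
      simp only [List.map_cons]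
      show pvInsFold (PySem.List.insert (x :: xs) (0 + 0) v) v _ (0 + 1) = _
      rw [(by norm_num : (0 + 0 : Int) = 0), PySem.List.insert_zero, hshift]
      rw [pv_insFold_cons_succm _ _ _ _ _ (by
            intro a ha; rw [List.mem_map] at ha; obtain ⟨b, hb, rfl⟩ := ha
            have := hnn b hb; omega) (by omega)]
      rw [pv_insFold_cons_shift _ _ _ _ _ hnn (by omega), ih]
      simp [hx]

-- an element of the first q slots after an insertion is the inserted value or one of the
-- first q slots before it
theorem pv_mem_take_insert {α : Type} : ∀ (q : Nat) (l : List α) (p : Nat) (v x : α),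
    x ∈ (l.take p ++ v :: l.drop p).take q → x = v ∨ x ∈ l.take q := by
  intro q
  induction q with
  | zero => intro l p v x hx; simp at hx
  | succ q ih =>
    intro l p v x hx
    cases p with
    | zero =>
      simp only [List.take_zero, List.drop_zero, List.nil_append, List.take_succ_cons,
        List.mem_cons] at hx
      rcases hx with rfl | hx
      · exact Or.inl rfl
      · right
        have hq : l.take q = (l.take (q+1)).take q := by
          rw [List.take_take]
          congr 1
          omega
        rw [hq] at hx
        exact List.mem_of_mem_take hx
    | succ p' =>
      cases l with
      | nil =>
        simp only [List.take_nil, List.drop_nil, List.nil_append, List.take_succ_cons,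
          List.take_nil, List.mem_cons, List.not_mem_nil, or_false] at hx
        exact Or.inl hx
      | cons a l' =>
        simp only [List.take_succ_cons, List.drop_succ_cons, List.cons_append,
          List.mem_cons] at hx
        rcases hx with rfl | hx
        · right; simp [List.take_succ_cons]
        · rcases ih l' p' v x hx with h | h
          · exact Or.inl h
          · right
            simp only [List.take_succ_cons, List.mem_cons]
            exact Or.inr h

-- an element of the first q slots has an index below q
theorem pv_mem_take_idx {α : Type} (l : List α) (q : Nat) (x : α) (hx : x ∈ l.take q) :
    ∃ (i : Nat) (hi : i < l.length), i < q ∧ l[i] = x := by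
  obtain ⟨i, hi, hg⟩ := List.getElem_of_mem hx
  have hlen : i < l.length ∧ i < q := by
    have := hi
    rw [List.length_take] at this
    omega
  refine ⟨i, hlen.1, hlen.2, ?_⟩
  rw [← hg, List.getElem_take]

-- sharper: when the insertion happens at or before slot q, the original slot q is pushed out
theorem pv_mem_take_insert_lt {α : Type} (l : List α) (p q : Nat) (hpq : p ≤ q) (v x : α)
    (hx : x ∈ (l.take p ++ v :: l.drop p).take (q + 1)) : x = v ∨ x ∈ l.take q := by
  rw [List.take_append] at hx
  have hA : (l.take p).length ≤ p := by simp [List.length_take]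
  rw [List.take_of_length_le (by omega : (l.take p).length ≤ q + 1)] at hx
  rcases List.mem_append.mp hx with hx1 | hx2
  · right
    have : l.take p = (l.take q).take p := by
      rw [List.take_take]
      congr 1
      omega
    rw [this] at hx1
    exact List.mem_of_mem_take hx1
  · have hpos : q + 1 - (l.take p).length = (q - (l.take p).length) + 1 := by omega
    rw [hpos, List.take_succ_cons] at hx2
    rcases List.mem_cons.mp hx2 with rfl | hx3
    · exact Or.inl rfl
    · right
      obtain ⟨t, ht, htq, hteq⟩ := pv_mem_take_idx (l.drop p) _ x hx3
      have hplen : p ≤ l.length := by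
        by_contra hc
        have : l.drop p = [] := List.drop_of_length_le (by omega)
        rw [this] at ht
        simp at ht
      have hAlen : (l.take p).length = p := by
        rw [List.length_take]
        omega
      have hlt : p + t < l.length := by
        rw [List.length_drop] at ht
        omega
      have hgd : (l.drop p)[t] = l[p + t]'hlt := by
        rw [List.getElem_drop]
      have hidx : p + t < q := by omega
      rw [← hteq, hgd]
      have hq : p + t < (l.take q).length := by
        rw [List.length_take]
        omega
      have : (l.take q)[p + t]'hq = l[p + t]'hlt := List.getElem_take
      rw [← this]
      exact List.getElem_mem hq

-- A's row loop computes each blank from the state at a stale index; as long as every slot a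
-- remaining index can see holds a length-n string, it is the constant length-n blank
theorem pv_gfold_strong (n : Nat) (ks : List Int) :
    ∀ (l : List String) (m : Int), 0 ≤ m →
    (∀ k ∈ ks, 0 ≤ k ∧ k.toNat < l.length ∧ ∀ x ∈ l.take (k.toNat + 1), x.toList.length = n) →
    (ks.foldl
      (fun (st : List String × Int) i =>
        (PySem.List.insert st.1 (i + st.2)
          (String.ofList (List.replicate ((PySem.List.pyGet? st.1 i).getD "").toList.length '.')),
         st.2 + 1)) (l, m)).1
      = pvInsFold l (String.ofList (List.replicate n '.')) ks m := by
  induction ks with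
  | nil => intro l m _ _; simp [pvInsFold]
  | cons k ks ih =>
    intro l m hm hk
    obtain ⟨hk0, hklt, htake⟩ := hk k (by simp)
    have hglt : (k : Int) < (l.length : Int) := by omega
    obtain ⟨y, hy⟩ : ∃ y, PySem.List.pyGet? l k = some y :=
      ⟨_, PySem.List.pyGet?_eq_some_getElem l hk0 hglt⟩
    have hymem : y ∈ l.take (k.toNat + 1) := by
      have h1 : PySem.List.pyGet? l k = some l[k.toNat] := PySem.List.pyGet?_eq_some_getElem l hk0 hglt
      have h2 : y = l[k.toNat] := by rw [hy] at h1; exact Option.some.inj h1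
      have h3 : k.toNat < (l.take (k.toNat + 1)).length := by
        rw [List.length_take]; omega
      have h4 : (l.take (k.toNat + 1))[k.toNat] = l[k.toNat] := List.getElem_take
      rw [h2, ← h4]
      exact List.getElem_mem h3
    have hylen : y.toList.length = n := htake y hymem
    simp only [List.foldl_cons]
    rw [show pvInsFold l (String.ofList (List.replicate n '.')) (k :: ks) m
          = pvInsFold (PySem.List.insert l (k + m) (String.ofList (List.replicate n '.')))
              (String.ofList (List.replicate n '.')) ks (m + 1) from rfl]
    rw [hy]
    simp only [Option.getD_some, hylen]
    apply ih _ (m + 1) (by omega)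
    intro a ha
    obtain ⟨ha0, halt, hatake⟩ := hk a (by simp [ha])
    rw [pv_ins_nonneg _ _ (by omega)]
    refine ⟨ha0, ?_, ?_⟩
    · simp only [List.length_append, List.length_take, List.length_cons, List.length_drop]
      omega
    · intro x hx
      rcases pv_mem_take_insert _ _ _ _ _ hx with rfl | hx2
      · simp
      · exact hatake x hx2

-- ==== phase 2 (columns) ====

theorem pv_rowTrans_step (cs : List Char) (t : Int) (h : 0 ≤ t) :
    PySem.List.slice cs none (some t) ++ '.' :: PySem.List.slice cs (some t) none
      = cs.take t.toNat ++ '.' :: cs.drop t.toNat := by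
  rw [PySem.List.slice_to _ h, PySem.List.slice_from _ h]

theorem pv_rowTrans_cons_succm (ks : List Int) :
    ∀ (x : Char) (cs : List Char) (m : Int), (∀ k ∈ ks, 0 ≤ k) → 0 ≤ m →
    pvRowTrans (x :: cs) ks (m + 1) = x :: pvRowTrans cs ks m := by
  induction ks with
  | nil => intro x cs m _ _; simp [pvRowTrans]
  | cons k ks ih =>
    intro x cs m hk hm
    have hk0 : 0 ≤ k := hk k (by simp)
    show pvRowTrans (PySem.List.slice (x :: cs) none (some (k + (m+1))) ++
          '.' :: PySem.List.slice (x :: cs) (some (k + (m+1))) none) ks (m + 1 + 1)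
        = x :: pvRowTrans (PySem.List.slice cs none (some (k + m)) ++
          '.' :: PySem.List.slice cs (some (k + m)) none) ks (m + 1)
    rw [pv_rowTrans_step _ _ (by omega), pv_rowTrans_step _ _ (by omega)]
    have h1 : (k + (m + 1)).toNat = (k + m).toNat + 1 := by omega
    rw [h1]
    simp only [List.take_succ_cons, List.drop_succ_cons, List.cons_append]
    exact ih x _ (m + 1) (fun a ha => hk a (by simp [ha])) (by omega)

theorem pv_rowTrans_cons_shift (ks : List Int) :
    ∀ (x : Char) (cs : List Char) (m : Int), (∀ k ∈ ks, 0 ≤ k) → 0 ≤ m →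
    pvRowTrans (x :: cs) (ks.map (· + 1)) m = x :: pvRowTrans cs ks m := by
  induction ks with
  | nil => intro x cs m _ _; simp [pvRowTrans]
  | cons k ks ih =>
    intro x cs m hk hm
    have hk0 : 0 ≤ k := hk k (by simp)
    show pvRowTrans (PySem.List.slice (x :: cs) none (some ((k+1) + m)) ++
          '.' :: PySem.List.slice (x :: cs) (some ((k+1) + m)) none) (ks.map (· + 1)) (m + 1)
        = x :: pvRowTrans (PySem.List.slice cs none (some (k + m)) ++
          '.' :: PySem.List.slice cs (some (k + m)) none) ks (m + 1)
    rw [pv_rowTrans_step _ _ (by omega), pv_rowTrans_step _ _ (by omega)]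
    have h1 : ((k + 1) + m).toNat = (k + m).toNat + 1 := by omega
    rw [h1]
    simp only [List.take_succ_cons, List.drop_succ_cons, List.cons_append]
    exact ih x _ (m + 1) (fun a ha => hk a (by simp [ha])) (by omega)

theorem pv_expandRow_congr : ∀ (cs : List Char) (e f : Nat → Bool), (∀ j, e j = f j) →
    pvExpandRow e cs = pvExpandRow f cs := by
  intro cs
  induction cs with
  | nil => intro e f _; rfl
  | cons c cs ih =>
    intro e f h
    show (if e 0 then ['.', c] else [c]) ++ pvExpandRow (fun t => e (t + 1)) cs
        = (if f 0 then ['.', c] else [c]) ++ pvExpandRow (fun t => f (t + 1)) cs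
    rw [h 0, ih (fun t => e (t + 1)) (fun t => f (t + 1)) (fun j => h (j + 1))]

theorem pv_expandRow_false : ∀ (cs : List Char) (e : Nat → Bool), (∀ j, e j = false) →
    pvExpandRow e cs = cs := by
  intro cs
  induction cs with
  | nil => intro e _; rfl
  | cons c cs ih =>
    intro e h
    show (if e 0 then ['.', c] else [c]) ++ pvExpandRow (fun t => e (t + 1)) cs = c :: cs
    rw [h 0, ih (fun t => e (t + 1)) (fun j => h (j + 1))]
    simp

theorem pv_rowTrans_eq_expandRow : ∀ (cs : List Char) (n : Nat) (e : Nat → Bool), n ≤ cs.length →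
    pvRowTrans cs (((List.range n).filter e).map (fun (j : Nat) => (j : Int))) 0
      = pvExpandRow (fun j => decide (j < n) && e j) cs := by
  intro cs
  induction cs with
  | nil =>
    intro n e hn
    have : n = 0 := by simpa using hn
    subst this
    simp [pvRowTrans, pvExpandRow]
  | cons c cs ih =>
    intro n e hn
    cases n with
    | zero =>
      rw [List.range_zero, List.filter_nil, List.map_nil]
      show (c :: cs) = _
      rw [pv_expandRow_false (c :: cs) _ (by intro j; simp)]
    | succ n =>
      rw [List.range_succ_eq_map, List.filter_cons]
      have hmapmap : ∀ (r : List Nat),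
          ((List.filter e (r.map Nat.succ)).map (fun (j : Nat) => (j : Int)))
            = ((List.filter (fun t => e (t + 1)) r).map (fun (j : Nat) => (j : Int))).map (· + 1) := by
        intro r
        rw [List.filter_map, List.map_map, List.map_map,
            show ((fun t => e (t + 1)) : Nat → Bool) = (e ∘ Nat.succ) from rfl]
        apply List.map_congr_left
        intro a _
        simp [Function.comp]
      have hnn : ∀ k ∈ (List.filter (fun t => e (t + 1)) (List.range n)).map (fun (j : Nat) => (j : Int)), 0 ≤ k := by
        intro k hkm
        simp only [List.mem_map] at hkm
        obtain ⟨a, _, rfl⟩ := hkm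
        positivity
      have hcs : n ≤ cs.length := by simpa using hn
      have hcong : pvExpandRow (fun j => decide (j < n) && e (j + 1)) cs
          = pvExpandRow (fun t => (fun j => decide (j < n + 1) && e j) (t + 1)) cs := by
        apply pv_expandRow_congr
        intro j
        rw [decide_eq_decide.mpr (by omega : (j < n) ↔ (j + 1 < n + 1))]
      by_cases he : e 0 = true
      · rw [if_pos he]
        simp only [List.map_cons, Nat.cast_zero]
        rw [hmapmap]
        show pvRowTrans (PySem.List.slice (c :: cs) none (some (0 + 0)) ++
              '.' :: PySem.List.slice (c :: cs) (some (0 + 0)) none) _ (0 + 1) = _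
        rw [pv_rowTrans_step _ _ (by omega)]
        rw [show ((0:Int) + 0).toNat = 0 from rfl]
        simp only [List.take_zero, List.drop_zero, List.nil_append]
        rw [pv_rowTrans_cons_succm _ _ _ _ (by
              intro a ha; rw [List.mem_map] at ha; obtain ⟨b, hb, rfl⟩ := ha
              have := hnn b hb; omega) (by omega)]
        rw [pv_rowTrans_cons_shift _ _ _ _ hnn (by omega), ih n _ hcs, hcong]
        simp [pvExpandRow, he]
      · rw [if_neg he]
        rw [hmapmap]
        rw [pv_rowTrans_cons_shift _ _ _ _ hnn (by omega), ih n _ hcs, hcong]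
        have he' : e 0 = false := by simpa using he
        simp [pvExpandRow, he']

theorem pv_colfold_eq_map (ks : List Int) :
    ∀ (rows : List String) (m : Int),
    (ks.foldl
      (fun (st : List String × Int) i =>
        (st.1.map (fun row =>
          String.ofList (PySem.List.slice row.toList none (some (i + st.2)) ++
            '.' :: PySem.List.slice row.toList (some (i + st.2)) none)),
         st.2 + 1)) (rows, m)).1
      = rows.map (fun r => String.ofList (pvRowTrans r.toList ks m)) := by
  induction ks with
  | nil => intro rows m; simp [pvRowTrans]
  | cons k ks ih =>
    intro rows m
    simp only [List.foldl_cons]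
    rw [ih]
    rw [List.map_map]
    apply List.map_congr_left
    intro r _
    simp only [Function.comp]
    congr 1
    show pvRowTrans _ ks (m + 1) = pvRowTrans r.toList (k :: ks) m
    rw [show pvRowTrans r.toList (k :: ks) m
          = pvRowTrans (PySem.List.slice r.toList none (some (k + m)) ++
              '.' :: PySem.List.slice r.toList (some (k + m)) none) ks (m + 1) from rfl]
    congr 1
    simp

-- expanding an all-dots row of length n gives n + (number of empty columns) dots
theorem pv_expandRow_replicate : ∀ (n : Nat) (e : Nat → Bool),
    pvExpandRow e (List.replicate n '.') = List.replicate (n + (List.range n).countP e) '.' := by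
  intro n
  induction n with
  | zero => intro e; simp [pvExpandRow]
  | succ n ih =>
    intro e
    rw [List.replicate_succ, List.range_succ_eq_map]
    show (if e 0 then ['.', '.'] else ['.']) ++ pvExpandRow (fun t => e (t + 1)) (List.replicate n '.')
        = _
    rw [ih (fun t => e (t + 1))]
    rw [List.countP_cons, List.countP_map]
    have : (List.countP (e ∘ Nat.succ) (List.range n)) = List.countP (fun t => e (t + 1)) (List.range n) := by
      apply List.countP_congr
      intro a _
      simp [Function.comp, Nat.succ_eq_add_one]
    rw [this]
    cases he : e 0 with
    | true =>
      simp only [if_pos trivial]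
      rw [show ((['.', '.'] : List Char) ++ List.replicate (n + List.countP (fun t => e (t + 1)) (List.range n)) '.')
            = List.replicate ((n + List.countP (fun t => e (t + 1)) (List.range n)) + 2) '.' from rfl]
      congr 1
      omega
    | false =>
      simp only [Bool.false_eq_true, if_false]
      rw [show ((['.'] : List Char) ++ List.replicate (n + List.countP (fun t => e (t + 1)) (List.range n)) '.')
            = List.replicate ((n + List.countP (fun t => e (t + 1)) (List.range n)) + 1) '.' from rfl]
      congr 1
      omega

-- ==== B's join over enumerate is pvExpandRow ====

theorem pv_flatMap_enum_eq_expandRow : ∀ (cs : List Char) (g : Int → Bool) (e : Nat → Bool),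
    (∀ j : Nat, j < cs.length → g (j : Int) = e j) →
    (PySem.List.enumerate cs).flatMap (fun p => if g p.1 then ['.', p.2] else [p.2])
      = pvExpandRow e cs := by
  intro cs
  induction cs with
  | nil => intro g e _; simp [PySem.List.enumerate, pvExpandRow]
  | cons c cs ih =>
    intro g e hg
    rw [PySem.List.enumerate_cons]
    simp only [zero_add]
    rw [pv_enum_shift cs 1]
    simp only [List.flatMap_cons, List.flatMap_map]
    have h0 : g 0 = e 0 := by
      have := hg 0 (by simp)
      simpa using this
    rw [show (fun p : Int × Char => if g ((fun q : Int × Char => (q.1 + 1, q.2)) p).1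
            then ['.', ((fun q : Int × Char => (q.1 + 1, q.2)) p).2]
            else [((fun q : Int × Char => (q.1 + 1, q.2)) p).2])
          = (fun p : Int × Char => if (fun i => g (i + 1)) p.1 then ['.', p.2] else [p.2]) from rfl]
    rw [ih (fun i => g (i + 1)) (fun t => e (t + 1)) (by
      intro j hj
      have := hg (j + 1) (by simpa using Nat.succ_lt_succ hj)
      push_cast at this ⊢
      simpa using this)]
    simp [pvExpandRow, h0]

-- the two ports' column-emptiness tests agree on in-range columns
theorem pv_colpred_eq (space_map : List String) (n : Nat) (j : Nat) (hj : j < n)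
    (hlen : ∀ r ∈ space_map, n ≤ r.toList.length) :
    (space_map.all (fun row => ((PySem.List.pyGet? row.toList (j : Int)).getD '#') != '#'))
      = pvColEmpty space_map (j : Int) := by
  unfold pvColEmpty
  induction space_map with
  | nil => simp
  | cons r rs ih =>
    have hr : n ≤ r.toList.length := hlen r (by simp)
    obtain ⟨c, hc⟩ : ∃ c, PySem.List.pyGet? r.toList (j : Int) = some c :=
      ⟨_, PySem.List.pyGet?_eq_some_getElem r.toList (by omega) (by omega)⟩
    simp only [List.all_cons, List.map_cons, List.contains_cons]
    rw [ih (fun a ha => hlen a (by simp [ha])), hc]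
    simp only [Option.getD_some]
    by_cases hcc : c = '#'
    · simp [hcc]
    · simp [bne, Bool.beq_comm]

-- ==== assembly ====

theorem pv_cols_eq (sm : List String) (row0 : List Char) :
    ((PySem.List.enumerate row0).filter
        (fun q => !((sm.map (fun row => PySem.List.pyGet? row.toList q.1)).contains (some '#')))).map
      (fun q => q.1)
      = ((List.range row0.length).filter (fun (j : Nat) => pvColEmpty sm (j : Int))).map
          (fun (j : Nat) => (j : Int)) := by
  have h1 : ((PySem.List.enumerate row0).filter
        (fun q => !((sm.map (fun row => PySem.List.pyGet? row.toList q.1)).contains (some '#')))).map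
      (fun q => q.1)
      = ((PySem.List.enumerate row0).map (fun q => q.1)).filter (fun i => pvColEmpty sm i) := by
    rw [List.filter_map]
    rfl
  rw [h1, PySem.List.map_fst_enumerate, zero_add, PySem.List.pyRange_zero_natCast,
      List.filter_map]
  rfl

-- A's whole row phase: one blank of length n before every galaxy-free row
theorem pv_rowphase (sm : List String) (n : Nat)
    (hC1 : ∀ j, ∀ (hj : j < sm.length), PySem.Str.isIn "#" sm[j] = false →
      ∀ i < j, ∀ (hi : i < sm.length), sm[i].toList.length = n)
    (hC2 : ∀ j, ∀ (hj : j < sm.length), PySem.Str.isIn "#" sm[j] = false →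
      (∀ i < j, ∀ (hi : i < sm.length), PySem.Str.isIn "#" sm[i] = true) →
      sm[j].toList.length = n) :
    ((((PySem.List.enumerate sm).filter (fun q => !PySem.Str.isIn "#" q.2)).map (fun q => q.1)).foldl
      (fun (st : List String × Int) i =>
        (PySem.List.insert st.1 (i + st.2)
          (String.ofList (List.replicate ((PySem.List.pyGet? st.1 i).getD "").toList.length '.')),
         st.2 + 1)) (sm, 0)).1
      = sm.flatMap (fun r => if PySem.Str.isIn "#" r then [r]
          else [String.ofList (List.replicate n '.'), r]) := by
  rw [← pv_insFold_flatMap]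
  set p : String → Bool := fun r => PySem.Str.isIn "#" r with hp
  set ks := ((PySem.List.enumerate sm).filter (fun q => !p q.2)).map (fun q => q.1) with hksdef
  cases hks : ks with
  | nil => simp [pvInsFold]
  | cons k0 rest =>
    obtain ⟨a0, ha0, rfl, hemp0⟩ := pv_ks_mem p sm k0 (by rw [← hksdef, hks]; simp)
    have hsorted := pv_ks_sorted p sm
    rw [← hksdef, hks] at hsorted
    have hrest_gt : ∀ x ∈ rest, (a0 : Int) < x := (List.pairwise_cons.mp hsorted).1
    have hfirst : ∀ i < a0, ∀ (hi : i < sm.length), p sm[i] = true := by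
      intro i hia hi
      by_contra hni
      have hni' : p sm[i] = false := by simpa using hni
      have hmem := pv_ks_complete p sm i hi hni'
      rw [← hksdef, hks] at hmem
      rcases List.mem_cons.mp hmem with heq | hmem2
      · have : i = a0 := by exact_mod_cast heq
        omega
      · have := hrest_gt _ hmem2
        omega
    have hlen0 : sm[a0].toList.length = n := hC2 a0 ha0 hemp0 hfirst
    -- peel the first insertion from both folds
    simp only [List.foldl_cons]
    have hget0 : PySem.List.pyGet? sm ((a0 : Nat) : Int) = some sm[a0] :=
      PySem.List.pyGet?_eq_some_getElem sm (by positivity) (by exact_mod_cast ha0)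
    rw [hget0]
    simp only [Option.getD_some, hlen0]
    rw [show pvInsFold sm (String.ofList (List.replicate n '.')) (((a0 : Nat) : Int) :: rest) 0
          = pvInsFold (PySem.List.insert sm (((a0 : Nat) : Int) + 0) (String.ofList (List.replicate n '.')))
              (String.ofList (List.replicate n '.')) rest (0 + 1) from rfl]
    apply pv_gfold_strong n rest _ (0 + 1) (by omega)
    intro k hkrest
    obtain ⟨a, ha, rfl, hemp⟩ := pv_ks_mem p sm k (by rw [← hksdef, hks]; exact List.mem_cons_of_mem _ hkrest)
    have haa0 : a0 < a := by
      have := hrest_gt _ hkrest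
      exact_mod_cast this
    have hta0 : (((a0 : Nat) : Int) + 0).toNat = a0 := by omega
    have hta : (((a : Nat) : Int)).toNat = a := by omega
    refine ⟨by positivity, ?_, ?_⟩
    · rw [pv_ins_nonneg _ _ (by positivity), hta0, hta]
      simp only [List.length_append, List.length_take, List.length_cons, List.length_drop]
      omega
    · intro x hx
      rw [pv_ins_nonneg _ _ (by positivity), hta0, hta] at hx
      rcases pv_mem_take_insert_lt sm a0 a (by omega) _ x hx with rfl | hx2
      · simp
      · obtain ⟨i, hi, hiq, hieq⟩ := pv_mem_take_idx sm _ x hx2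
        rw [← hieq]
        exact hC1 a ha hemp i (by omega) hi

theorem pv_A_eq (r0 : String) (rest : List String)
    (hge : ∀ r ∈ r0 :: rest, r0.toList.length ≤ r.toList.length)
    (hC1 : ∀ j, ∀ (hj : j < (r0 :: rest).length), PySem.Str.isIn "#" (r0 :: rest)[j] = false →
      ∀ i < j, ∀ (hi : i < (r0 :: rest).length), (r0 :: rest)[i].toList.length = r0.toList.length)
    (hC2 : ∀ j, ∀ (hj : j < (r0 :: rest).length), PySem.Str.isIn "#" (r0 :: rest)[j] = false →
      (∀ i < j, ∀ (hi : i < (r0 :: rest).length), PySem.Str.isIn "#" (r0 :: rest)[i] = true) →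
      (r0 :: rest)[j].toList.length = r0.toList.length) :
    expand_space_map (r0 :: rest) = pvCanon (r0 :: rest) r0.toList.length := by
  simp only [expand_space_map]
  rw [pv_foldl_append_ifnot (p := fun p : Int × String => PySem.Str.isIn "#" p.2)
        (f := fun p : Int × String => p.1),
      pv_foldl_append_ifnot
        (p := fun q : Int × Char =>
          ((r0 :: rest).map (fun row => PySem.List.pyGet? row.toList q.1)).contains (some '#'))
        (f := fun q : Int × Char => q.1)]
  simp only [List.nil_append, PySem.List.pyGet?_zero_cons, Option.getD_some]
  rw [pv_rowphase (r0 :: rest) r0.toList.length hC1 hC2]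
  rw [pv_colfold_eq_map]
  rw [pv_cols_eq (r0 :: rest) r0.toList]
  rw [List.map_flatMap]
  unfold pvCanon
  rw [List.flatMap_def, List.flatMap_def]
  apply congrArg
  apply List.map_congr_left
  intro r hr
  have hrlen : r0.toList.length ≤ r.toList.length := hge r hr
  have htrans : ∀ (s : String), r0.toList.length ≤ s.toList.length →
      String.ofList (pvRowTrans s.toList
        (((List.range r0.toList.length).filter (fun (j : Nat) => pvColEmpty (r0 :: rest) (j : Int))).map
          (fun (j : Nat) => (j : Int))) 0)
      = String.ofList (pvExpandRow
          (fun j => decide (j < r0.toList.length) && pvColEmpty (r0 :: rest) (j : Int)) s.toList) := by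
    intro s hs
    rw [pv_rowTrans_eq_expandRow s.toList r0.toList.length _ hs]
  cases hgal : PySem.Str.isIn "#" r with
  | true =>
    simp only [if_true, List.map_cons, List.map_nil]
    rw [htrans r hrlen]
    rfl
  | false =>
    simp only [Bool.false_eq_true, if_false, List.map_cons, List.map_nil]
    rw [htrans r hrlen]
    have hb : String.ofList (pvRowTrans
          (String.ofList (List.replicate r0.toList.length '.')).toList
          (((List.range r0.toList.length).filter
              (fun (j : Nat) => pvColEmpty (r0 :: rest) (j : Int))).map
            (fun (j : Nat) => (j : Int))) 0)
        = pvBlank (r0 :: rest) r0.toList.length := by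
      rw [String.toList_ofList]
      rw [pv_rowTrans_eq_expandRow _ r0.toList.length _ (by simp)]
      rw [pv_expandRow_replicate]
      unfold pvBlank
      have hcp : List.countP (fun j => decide (j < r0.toList.length) &&
            pvColEmpty (r0 :: rest) ((j : Nat) : Int)) (List.range r0.toList.length)
          = List.countP (fun (j : Nat) => pvColEmpty (r0 :: rest) (j : Int)) (List.range r0.toList.length) := by
        apply List.countP_congr
        intro a ha
        rw [List.mem_range] at ha
        have ha' : a < r0.length := by
          have h0 : r0.toList.length = r0.length := by simp
          omega
        simp [ha']
      rw [hcp]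
    rw [hb]
    rfl

theorem pv_B_eq (r0 : String) (rest : List String)
    (hge : ∀ r ∈ r0 :: rest, r0.toList.length ≤ r.toList.length) :
    expand_space_map_alt (r0 :: rest) = pvCanon (r0 :: rest) r0.toList.length := by
  simp only [expand_space_map_alt, PySem.List.pyGet?_zero_cons, Option.getD_some]
  set n := r0.toList.length with hn
  set L := ((PySem.List.pyRange 0 (n : Int)).filter
      (fun j => (r0 :: rest).all
        (fun row => ((PySem.List.pyGet? row.toList j).getD '#') != '#'))) with hL
  have hLnodup : L.Nodup := by
    rw [hL]
    apply List.Nodup.filter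
    rw [PySem.List.pyRange_zero_natCast]
    exact (List.nodup_range).map (fun a b h => by exact_mod_cast h)
  have hset : PySem.Set.ofList L = L :=
    (PySem.Set.update_eq_append_of_disjoint [] L hLnodup (by simp)).trans (List.nil_append L)
  have hcount : (PySem.Set.len (PySem.Set.ofList L)).toNat
      = (List.range n).countP (fun (j : Nat) => pvColEmpty (r0 :: rest) (j : Int)) := by
    rw [hset]
    show (((L.length : Int)).toNat) = _
    rw [Int.toNat_natCast, hL, ← List.countP_eq_length_filter, PySem.List.pyRange_zero_natCast,
        List.countP_map]
    apply List.countP_congr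
    intro a ha
    rw [List.mem_range] at ha
    simp only [Function.comp]
    rw [pv_colpred_eq (r0 :: rest) n a ha hge]
  have hmemL : ∀ (j : Nat), ((j : Int) ∈ L) ↔ (j < n ∧ pvColEmpty (r0 :: rest) (j : Int) = true) := by
    intro j
    rw [hL, List.mem_filter, PySem.List.pyRange_zero_natCast, List.mem_map]
    constructor
    · rintro ⟨⟨a, ha, heq⟩, hpa⟩
      have haj : a = j := by exact_mod_cast heq
      rw [List.mem_range] at ha
      rw [haj] at ha
      rw [pv_colpred_eq (r0 :: rest) n j ha hge] at hpa
      exact ⟨ha, hpa⟩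
    · rintro ⟨hj, hpe⟩
      constructor
      · exact ⟨j, List.mem_range.mpr hj, rfl⟩
      · rw [pv_colpred_eq (r0 :: rest) n j hj hge]
        exact hpe
  rw [hcount]
  rw [show (fun (out : List String) (row : String) =>
        (if PySem.Str.isIn "#" row then out
         else out ++ [String.ofList (List.replicate (n +
            (List.range n).countP (fun (j : Nat) => pvColEmpty (r0 :: rest) (j : Int))) '.')]) ++
        [String.ofList ((PySem.List.enumerate row.toList).flatMap
          (fun p => if PySem.Set.contains (PySem.Set.ofList L) p.1 then ['.', p.2] else [p.2]))])
      = (fun out row => out ++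
          (if PySem.Str.isIn "#" row then
            [String.ofList ((PySem.List.enumerate row.toList).flatMap
              (fun p => if PySem.Set.contains (PySem.Set.ofList L) p.1 then ['.', p.2] else [p.2]))]
           else
            [String.ofList (List.replicate (n +
                (List.range n).countP (fun (j : Nat) => pvColEmpty (r0 :: rest) (j : Int))) '.'),
             String.ofList ((PySem.List.enumerate row.toList).flatMap
              (fun p => if PySem.Set.contains (PySem.Set.ofList L) p.1 then ['.', p.2] else [p.2]))])) from by
      funext out row
      cases PySem.Str.isIn "#" row <;> simp]
  rw [PySem.List.foldl_append_eq_flatMap]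
  rw [List.nil_append]
  unfold pvCanon
  rw [List.flatMap_def, List.flatMap_def]
  apply congrArg
  apply List.map_congr_left
  intro r hr
  have hrow : String.ofList ((PySem.List.enumerate r.toList).flatMap
      (fun p => if PySem.Set.contains (PySem.Set.ofList L) p.1 then ['.', p.2] else [p.2]))
      = pvE (r0 :: rest) n r := by
    unfold pvE
    apply congrArg
    apply pv_flatMap_enum_eq_expandRow r.toList
      (fun i => PySem.Set.contains (PySem.Set.ofList L) i)
      (fun j => decide (j < n) && pvColEmpty (r0 :: rest) (j : Int))
    intro j hj
    show (PySem.Set.ofList L).contains ((j : Int)) = _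
    rw [hset]
    by_cases hjn : j < n ∧ pvColEmpty (r0 :: rest) (j : Int) = true
    · have : (j : Int) ∈ L := (hmemL j).mpr hjn
      simp [PySem.Set.contains, this, hjn.1, hjn.2]
    · have : ¬ ((j : Int) ∈ L) := fun hmem => hjn ((hmemL j).mp hmem)
      have h2 : (decide (j < n) && pvColEmpty (r0 :: rest) (j : Int)) = false := by
        rcases Decidable.not_and_iff_not_or_not.mp hjn with h | h
        · simp [h]
        · rw [Bool.not_eq_true] at h
          simp [h]
      simp [PySem.Set.contains, this, h2]
  rw [hrow]
  rfl

-- ===== VERDICT (by name: the statement is the Claim_ definition above) =====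
theorem expand_space_map_spec : Claim_equal_expand_space_map := by
  intro sm hdom hpre
  obtain ⟨hne, hge, hC1, hC2⟩ := hpre
  unfold Spec_expand_space_map
  cases sm with
  | nil => exact absurd rfl hne
  | cons r0 rest =>
    have hge' : ∀ r ∈ r0 :: rest, r0.toList.length ≤ r.toList.length := by
      intro r hr
      have := hge r hr
      simpa using this
    rw [pv_A_eq r0 rest hge' (by simpa using hC1) (by simpa using hC2),
        pv_B_eq r0 rest hge']
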